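-- pv_equiv track=rewrite | github.com/mindshackledsteven/aoc23 | day7/day7_pt1.py | is_1pair
-- ===== SOURCE A (Python) =====
-- def is_1pair(hand):
--     char_count = {}
--     for char in hand:
--         if char in char_count:
--             char_count[char] += 1
--         else:
--             char_count[char] = 1
--     return (sorted(char_count.values()) == [1, 1, 1, 2])
-- ===== SOURCE B (Python) =====
-- def is_1pair(hand):
--     cards = list(hand)
--     return len(cards) == 5 and len(set(cards)) == 4
-- ===== Notes on version B (the rewrite author's own statement) =====
-- stated objective: simpler
-- what changed: Replaces the frequency dict plus sorted-values comparison with a direct cardinality test: a hand is exactly one pair iff it has 5 cards and 4 distinct cards.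
import Mathlib
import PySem

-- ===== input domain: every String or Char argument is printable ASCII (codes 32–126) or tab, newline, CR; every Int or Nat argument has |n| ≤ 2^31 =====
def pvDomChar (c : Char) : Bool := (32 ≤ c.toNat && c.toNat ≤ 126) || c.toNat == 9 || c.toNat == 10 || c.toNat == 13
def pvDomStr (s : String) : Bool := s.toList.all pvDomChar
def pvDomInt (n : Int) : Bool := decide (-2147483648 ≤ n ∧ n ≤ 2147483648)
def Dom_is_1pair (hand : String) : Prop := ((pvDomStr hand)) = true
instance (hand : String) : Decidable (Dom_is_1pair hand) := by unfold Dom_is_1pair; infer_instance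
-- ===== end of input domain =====

-- B replaces A's frequency dict + sorted-values comparison by the equivalent
-- cardinality test "5 cards and 4 distinct cards" (objective: simpler).

-- ===== PORT A =====
def is_1pair (hand : String) : Bool :=
  let char_count : PySem.Dict Char Int :=
    hand.toList.foldl
      (fun d char =>
        if d.contains char then d.insert char (d.getD char 0 + 1)
        else d.insert char 1)
      PySem.Dict.empty
  PySem.List.sorted char_count.values (fun x => x) false == [(1 : Int), 1, 1, 2]

-- ===== PORT B =====
def is_1pair_alt (hand : String) : Bool :=
  let cards := hand.toList
  cards.length == 5 && (PySem.Set.ofList cards).length == 4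

-- ===== PRECONDITION & SPEC =====
def Spec_is_1pair (hand : String) (out : Bool) : Prop := out = is_1pair_alt hand
instance (hand : String) (out : Bool) : Decidable (Spec_is_1pair hand out) := by unfold Spec_is_1pair; infer_instance

-- ===== CLAIM (what is proved, stated in full; the proofs are below) =====
def Claim_equal_is_1pair : Prop := ∀ (hand : String), Dom_is_1pair hand → Spec_is_1pair hand (is_1pair hand)

-- ===== LEMMAS AND PROOFS =====

-- A's branched loop body is the counter fold.
lemma fold_eq_counter (l : List Char) :
    l.foldl
      (fun d char =>
        if d.contains char then d.insert char (d.getD char 0 + 1)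
        else d.insert char 1)
      (PySem.Dict.empty : PySem.Dict Char Int)
    = PySem.Dict.counter l := by
  rw [← PySem.Dict.foldl_insert_getD_add_one_eq_counter]
  congr 1
  funext d c
  by_cases h : d.contains c = true
  · simp [h]
  · have : d.getD c 0 = 0 := by
      simp only [Bool.not_eq_true, PySem.Dict.contains_eq_isSome_get?] at h
      simp only [PySem.Dict.getD, Option.isSome_eq_false_iff, Option.isNone_iff_eq_none] at *
      simp [h]
    simp [h, this]

lemma cast_sum (s : List Char) (f : Char → Nat) :
    (s.map (fun k => ((f k : Nat) : Int))).sum = ((s.map f).sum : Int) := by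
  induction s with
  | nil => simp
  | cons a t ih => simp [ih]

lemma ofList_perm_dedup (l : List Char) : (PySem.Set.ofList l).Perm l.dedup := by
  apply (List.perm_ext_iff_of_nodup (PySem.Set.nodup_ofList l) l.nodup_dedup).mpr
  intro a
  simp [PySem.Set.mem_ofList, List.mem_dedup]

lemma sum_counts (l : List Char) :
    ((PySem.Set.ofList l).map (fun k => l.count k)).sum = l.length := by
  rw [((ofList_perm_dedup l).map (fun k => l.count k)).sum_eq]
  exact List.sum_map_count_dedup_eq_length l

lemma key_iff (l : List Char) :
    PySem.List.sorted ((PySem.Set.ofList l).map (fun k => (l.count k : Int))) (fun x => x) false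
        = [(1 : Int), 1, 1, 2]
    ↔ (l.length = 5 ∧ (PySem.Set.ofList l).length = 4) := by
  have hsum : ((PySem.Set.ofList l).map (fun k => (l.count k : Int))).sum = (l.length : Int) := by
    rw [cast_sum, sum_counts]
  constructor
  · intro h
    have hperm : ([(1 : Int), 1, 1, 2]).Perm
        ((PySem.Set.ofList l).map (fun k => (l.count k : Int))) := by
      rw [← h]; exact PySem.List.sorted_perm _ _ _
    have hlen := hperm.length_eq
    have hs := hperm.sum_eq
    simp at hlen
    rw [hsum] at hs
    simp at hs
    constructor
    · omega
    · simpa using hlen.symm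
  · rintro ⟨h5, h4⟩
    have hpos : ∀ v ∈ (PySem.Set.ofList l).map (fun k => (l.count k : Int)), 1 ≤ v := by
      intro v hv
      obtain ⟨k, hk, rfl⟩ := List.mem_map.mp hv
      have : k ∈ l := (PySem.Set.mem_ofList _ _).mp hk
      have := List.count_pos_iff.mpr this
      omega
    have hlen : ((PySem.Set.ofList l).map (fun k => (l.count k : Int))).length = 4 := by
      simpa using h4
    obtain ⟨a, b, c, d, hvals⟩ :
        ∃ a b c d, (PySem.Set.ofList l).map (fun k => (l.count k : Int)) = [a, b, c, d] := by
      match hv : (PySem.Set.ofList l).map (fun k => (l.count k : Int)), hlen with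
      | [a, b, c, d], _ => exact ⟨a, b, c, d, rfl⟩
    rw [hvals] at hsum hpos ⊢
    have ha := hpos a (by simp)
    have hb := hpos b (by simp)
    have hc := hpos c (by simp)
    have hd := hpos d (by simp)
    simp [h5] at hsum
    apply PySem.List.sorted_id_eq_of_perm_of_pairwise
    · have : (a = 2 ∧ b = 1 ∧ c = 1 ∧ d = 1) ∨ (a = 1 ∧ b = 2 ∧ c = 1 ∧ d = 1) ∨
          (a = 1 ∧ b = 1 ∧ c = 2 ∧ d = 1) ∨ (a = 1 ∧ b = 1 ∧ c = 1 ∧ d = 2) := by omega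
      rcases this with ⟨rfl, rfl, rfl, rfl⟩ | ⟨rfl, rfl, rfl, rfl⟩ |
        ⟨rfl, rfl, rfl, rfl⟩ | ⟨rfl, rfl, rfl, rfl⟩ <;> decide
    · decide

-- ===== VERDICT (by name: the statement is the Claim_ definition above) =====
theorem is_1pair_spec : Claim_equal_is_1pair := by
  intro hand _
  unfold Spec_is_1pair is_1pair is_1pair_alt
  rw [Bool.eq_iff_iff]
  simp only [fold_eq_counter, PySem.Dict.values, PySem.Dict.items_counter, List.map_map,
    beq_iff_eq, Bool.and_eq_true]
  have : ((PySem.Set.ofList hand.toList).map ((fun p : Char × Int => p.2) ∘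
      fun k => (k, (hand.toList.count k : Int))))
      = (PySem.Set.ofList hand.toList).map (fun k => (hand.toList.count k : Int)) := rfl
  rw [this, key_iff]
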